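-- pv_equiv track=rewrite | github.com/Vishun-Projects/yaml-validator | audit_validator/match_report.py | parse_device_description
-- ===== SOURCE A (Python) =====
-- from typing import Dict, Any, List, Tuple, Optional
--
-- def parse_device_description(desc: str) -> Dict[str, str]:
--     # Very small heuristic parser: split by commas and assign semantic keys
--     parts = [p.strip() for p in desc.split(',') if p and p.strip()]
--     out = {}
--     if parts:
--         out['summary'] = parts[0]
--     for p in parts[1:]:
--         # heuristics
--         pl = p.lower()
--         if 'windows' in pl or 'linux' in pl or 'mac' in pl:
--             out['os'] = p
--         elif 'intel' in pl or 'amd' in pl or 'ryzen' in pl or 'xeon' in pl: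
--             out['cpu'] = p
--         elif 'nvidia' in pl or 'radeon' in pl or 'geforce' in pl or 'rx' in pl:
--             out['gpu'] = p
--         elif 'ram' in pl or 'gb' in pl:
--             out['memory'] = p
--         elif 'ssd' in pl or 'hdd' in pl or 'disk' in pl:
--             out['storage'] = p
--         else:
--             # append to misc
--             out.setdefault('misc', []).append(p)
--     # join misc
--     if 'misc' in out:
--         out['misc'] = ', '.join(out['misc'])
--     return out
-- ===== SOURCE B (Python) =====
-- CATS = [
--     ('os', ('windows', 'linux', 'mac')),
--     ('cpu', ('intel', 'amd', 'ryzen', 'xeon')),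
--     ('gpu', ('nvidia', 'radeon', 'geforce', 'rx')),
--     ('memory', ('ram', 'gb')),
--     ('storage', ('ssd', 'hdd', 'disk')),
-- ]
--
--
-- def _classify(p):
--     pl = p.lower()
--     hits = [key for key, kws in CATS if any(w in pl for w in kws)]
--     return hits[0] if hits else 'misc'
--
--
-- def parse_device_description(desc):
--     # staged: classify every part first, then group by label
--     parts = [p.strip() for p in desc.split(',') if p.strip()]
--     if not parts:
--         return {}
--     labeled = [(_classify(p), p) for p in parts[1:]]
--     out = {'summary': parts[0]}
--     for lab in dict.fromkeys(l for l, _ in labeled):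
--         vals = [p for l, p in labeled if l == lab]
--         out[lab] = ', '.join(vals) if lab == 'misc' else vals[-1]
--     return out
-- ===== Notes on version B (the rewrite author's own statement) =====
-- stated objective: alternative
-- what changed: A makes one pass mutating the dict per part (five-branch if/elif assigning keys, setdefault-list for misc, final join); B is a staged pipeline: classify every part into a (label, part) list via a category table, then group by label in first-occurrence order (dict.fromkeys), taking the last value per category and joining all misc parts at once.
import Mathlib
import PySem

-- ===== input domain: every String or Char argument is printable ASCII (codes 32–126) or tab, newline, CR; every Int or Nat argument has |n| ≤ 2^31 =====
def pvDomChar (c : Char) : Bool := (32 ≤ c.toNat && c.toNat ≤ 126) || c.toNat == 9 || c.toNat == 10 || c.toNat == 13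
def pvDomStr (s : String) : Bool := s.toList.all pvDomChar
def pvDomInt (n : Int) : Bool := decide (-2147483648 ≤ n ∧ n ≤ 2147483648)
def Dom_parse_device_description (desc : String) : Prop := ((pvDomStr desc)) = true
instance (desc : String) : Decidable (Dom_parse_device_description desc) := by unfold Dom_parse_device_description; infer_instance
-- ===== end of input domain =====

-- B replaces A's single mutating pass (if/elif chain, setdefault misc list, final join) with a
-- staged pipeline: classify each part via a category table, then group by label (alternative, same cost).


-- ===== PORT A =====
-- A's dict holds strings under the semantic keys and a LIST under 'misc' (joined after the
-- loop): modelled as Dict String (String ⊕ List String); the final `if 'misc' in out: join`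
-- is the per-item conversion at the end (only 'misc' ever holds a Sum.inr).
def pvStepA (d : PySem.Dict String (String ⊕ List String)) (p : String) :
    PySem.Dict String (String ⊕ List String) :=
  let pl := PySem.Str.lower p
  if PySem.Str.isIn "windows" pl || PySem.Str.isIn "linux" pl || PySem.Str.isIn "mac" pl then
    d.insert "os" (.inl p)
  else if PySem.Str.isIn "intel" pl || PySem.Str.isIn "amd" pl || PySem.Str.isIn "ryzen" pl || PySem.Str.isIn "xeon" pl then
    d.insert "cpu" (.inl p)
  else if PySem.Str.isIn "nvidia" pl || PySem.Str.isIn "radeon" pl || PySem.Str.isIn "geforce" pl || PySem.Str.isIn "rx" pl then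
    d.insert "gpu" (.inl p)
  else if PySem.Str.isIn "ram" pl || PySem.Str.isIn "gb" pl then
    d.insert "memory" (.inl p)
  else if PySem.Str.isIn "ssd" pl || PySem.Str.isIn "hdd" pl || PySem.Str.isIn "disk" pl then
    d.insert "storage" (.inl p)
  else
    -- out.setdefault('misc', []).append(p)
    match d.get? "misc" with
    | some (.inr l) => d.insert "misc" (.inr (l ++ [p]))
    | _ => d.insert "misc" (.inr [p])

def parse_device_description (desc : String) : List (String × String) :=
  let parts := (((PySem.Str.split? desc ",").getD []).filter
      (fun p => decide (p ≠ "") && decide (PySem.Str.strip p ≠ ""))).map PySem.Str.strip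
  let d0 : PySem.Dict String (String ⊕ List String) :=
    match parts with
    | [] => PySem.Dict.mk []
    | p0 :: _ => (PySem.Dict.mk []).insert "summary" (.inl p0)
  let d := (parts.drop 1).foldl pvStepA d0
  d.items.map (fun q => (q.1, match q.2 with | .inl s => s | .inr l => PySem.Str.join ", " l))

-- ===== PORT B =====
def pvCATS : List (String × List String) :=
  [("os", ["windows", "linux", "mac"]),
   ("cpu", ["intel", "amd", "ryzen", "xeon"]),
   ("gpu", ["nvidia", "radeon", "geforce", "rx"]),
   ("memory", ["ram", "gb"]),
   ("storage", ["ssd", "hdd", "disk"])]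

def pvClassify (p : String) : String :=
  let pl := PySem.Str.lower p
  let hits := (pvCATS.filter (fun c => c.2.any (fun w => PySem.Str.isIn w pl))).map Prod.fst
  match hits with          -- hits[0] if hits else 'misc'
  | [] => "misc"
  | k :: _ => k

def parse_device_description_alt (desc : String) : List (String × String) :=
  let parts := (((PySem.Str.split? desc ",").getD []).filter
      (fun p => decide (PySem.Str.strip p ≠ ""))).map PySem.Str.strip
  match parts with
  | [] => []
  | p0 :: rest =>
    let labeled := rest.map (fun p => (pvClassify p, p))
    let labs := PySem.List.dedup (labeled.map Prod.fst)   -- dict.fromkeys(...)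
    (labs.foldl (fun out lab =>
        let vals := (labeled.filter (fun q => q.1 == lab)).map Prod.snd
        -- vals[-1]: for lab ∈ labs vals is nonempty, where getLastD "" is exact
        out.insert lab (if lab == "misc" then PySem.Str.join ", " vals else vals.getLastD ""))
      ((PySem.Dict.mk []).insert "summary" p0)).items

-- ===== PRECONDITION & SPEC =====
def Spec_parse_device_description (desc : String) (out : List (String × String)) : Prop := out = parse_device_description_alt desc
instance (desc : String) (out : List (String × String)) : Decidable (Spec_parse_device_description desc out) := by unfold Spec_parse_device_description; infer_instance

-- ===== CLAIM (what is proved, stated in full; the proofs are below) =====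
def Claim_equal_parse_device_description : Prop := ∀ (desc : String), Dom_parse_device_description desc → Spec_parse_device_description desc (parse_device_description desc)

-- ===== LEMMAS AND PROOFS =====

-- the (label, part) stream B computes in its first stage
def pvLabeled (rest : List String) : List (String × String) :=
  rest.map (fun p => (pvClassify p, p))

-- all parts of the stream carrying a given label
def pvVals (L : List (String × String)) (lab : String) : List String :=
  (L.filter (fun q => q.1 == lab)).map Prod.snd

-- the value A's dict holds under a label, as a function of the stream
def pvAggA (L : List (String × String)) (lab : String) : String ⊕ List String :=
  if lab == "misc" then Sum.inr (pvVals L lab) else Sum.inl ((pvVals L lab).getLastD "")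

def pvConv (v : String ⊕ List String) : String :=
  match v with | .inl s => s | .inr l => PySem.Str.join ", " l

theorem pvClassify_eq (p : String) :
    pvClassify p =
      (if PySem.Str.isIn "windows" (PySem.Str.lower p) || PySem.Str.isIn "linux" (PySem.Str.lower p) || PySem.Str.isIn "mac" (PySem.Str.lower p) then "os"
       else if PySem.Str.isIn "intel" (PySem.Str.lower p) || PySem.Str.isIn "amd" (PySem.Str.lower p) || PySem.Str.isIn "ryzen" (PySem.Str.lower p) || PySem.Str.isIn "xeon" (PySem.Str.lower p) then "cpu"
       else if PySem.Str.isIn "nvidia" (PySem.Str.lower p) || PySem.Str.isIn "radeon" (PySem.Str.lower p) || PySem.Str.isIn "geforce" (PySem.Str.lower p) || PySem.Str.isIn "rx" (PySem.Str.lower p) then "gpu"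
       else if PySem.Str.isIn "ram" (PySem.Str.lower p) || PySem.Str.isIn "gb" (PySem.Str.lower p) then "memory"
       else if PySem.Str.isIn "ssd" (PySem.Str.lower p) || PySem.Str.isIn "hdd" (PySem.Str.lower p) || PySem.Str.isIn "disk" (PySem.Str.lower p) then "storage"
       else "misc") := by
  simp only [pvClassify, pvCATS, List.filter_cons, List.filter_nil, List.any_cons, List.any_nil,
    Bool.or_false, Bool.or_assoc]
  cases h1 : PySem.Str.isIn "windows" (PySem.Str.lower p) || (PySem.Str.isIn "linux" (PySem.Str.lower p) || PySem.Str.isIn "mac" (PySem.Str.lower p)) <;>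
  cases h2 : PySem.Str.isIn "intel" (PySem.Str.lower p) || (PySem.Str.isIn "amd" (PySem.Str.lower p) || (PySem.Str.isIn "ryzen" (PySem.Str.lower p) || PySem.Str.isIn "xeon" (PySem.Str.lower p))) <;>
  cases h3 : PySem.Str.isIn "nvidia" (PySem.Str.lower p) || (PySem.Str.isIn "radeon" (PySem.Str.lower p) || (PySem.Str.isIn "geforce" (PySem.Str.lower p) || PySem.Str.isIn "rx" (PySem.Str.lower p))) <;>
  cases h4 : PySem.Str.isIn "ram" (PySem.Str.lower p) || PySem.Str.isIn "gb" (PySem.Str.lower p) <;>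
  cases h5 : PySem.Str.isIn "ssd" (PySem.Str.lower p) || (PySem.Str.isIn "hdd" (PySem.Str.lower p) || PySem.Str.isIn "disk" (PySem.Str.lower p)) <;>
  rfl

theorem pvClassify_ne_summary (p : String) : pvClassify p ≠ "summary" := by
  rw [pvClassify_eq]; split_ifs <;> decide

-- A's chain step, rephrased through the classification
theorem pvStepA_classify (d : PySem.Dict String (String ⊕ List String)) (p : String) :
    pvStepA d p =
      (if pvClassify p = "misc" then
        (match d.get? "misc" with
         | some (.inr l) => d.insert "misc" (.inr (l ++ [p]))
         | _ => d.insert "misc" (.inr [p]))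
      else d.insert (pvClassify p) (.inl p)) := by
  rw [pvClassify_eq]
  simp only [pvStepA]
  split_ifs <;> simp_all

theorem pvGet?_mk_map (G : String → String ⊕ List String) (ks : List String) (k : String) :
    (PySem.Dict.mk (ks.map (fun l => (l, G l)))).get? k = if k ∈ ks then some (G k) else none := by
  induction ks with
  | nil => simp [PySem.Dict.get?]
  | cons a t ih =>
    by_cases h : a = k
    · subst h; simp [PySem.Dict.get?_mk_cons]
    · have h' : ¬ k = a := fun hk => h hk.symm
      simp [PySem.Dict.get?_mk_cons, (by simpa using h : (a == k) = false), ih, h']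

theorem pvDedup_snoc (l : List String) (x : String) :
    PySem.List.dedup (l ++ [x]) =
      if x ∈ l then PySem.List.dedup l else PySem.List.dedup l ++ [x] := by
  rw [PySem.List.dedup_eq_ofList, PySem.List.dedup_eq_ofList, PySem.Set.ofList_eq_foldl,
    PySem.Set.ofList_eq_foldl, List.foldl_append]
  simp only [List.foldl_cons, List.foldl_nil]
  rw [PySem.Set.add_eq_ite]
  simp [← PySem.Set.ofList_eq_foldl, PySem.Set.mem_ofList]

theorem pvVals_snoc (L : List (String × String)) (lab p l : String) :
    pvVals (L ++ [(lab, p)]) l = if lab = l then pvVals L l ++ [p] else pvVals L l := by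
  by_cases h : lab = l <;> simp [pvVals, List.filter_append, h]

theorem pvAggA_snoc_ne (L : List (String × String)) (lab p l : String) (h : lab ≠ l) :
    pvAggA (L ++ [(lab, p)]) l = pvAggA L l := by
  simp [pvAggA, pvVals_snoc, h]

theorem pvVals_nil_of_not_mem (L : List (String × String)) (lab : String)
    (h : lab ∉ L.map Prod.fst) : pvVals L lab = [] := by
  simp only [pvVals, List.map_eq_nil_iff, List.filter_eq_nil_iff]
  intro q hq
  simp only [beq_iff_eq]
  exact fun he => h (he ▸ List.mem_map_of_mem hq)

-- inserting the label of the new last stream element turns the table for L into the table for L ++ [(lab, p)]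
theorem pvInsert_step (p0 p lab : String) (L : List (String × String))
    (hlab : lab ≠ "summary") (v : String ⊕ List String)
    (hv : v = pvAggA (L ++ [(lab, p)]) lab) :
    (PySem.Dict.mk (("summary", Sum.inl p0) ::
        (PySem.List.dedup (L.map Prod.fst)).map (fun l => (l, pvAggA L l)))).insert lab v =
      PySem.Dict.mk (("summary", Sum.inl p0) ::
        (PySem.List.dedup ((L ++ [(lab, p)]).map Prod.fst)).map
          (fun l => (l, pvAggA (L ++ [(lab, p)]) l))) := by
  have hkeys : (PySem.Dict.mk (("summary", Sum.inl p0) ::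
      (PySem.List.dedup (L.map Prod.fst)).map (fun l => (l, pvAggA L l)))).contains lab
      = decide (lab ∈ PySem.List.dedup (L.map Prod.fst)) := by
    rw [PySem.Dict.contains_eq_decide_mem_keys]
    simp [PySem.Dict.keys_mk, hlab]
  simp only [List.map_append, List.map_cons, List.map_nil]
  rw [pvDedup_snoc]
  by_cases hmem : lab ∈ L.map Prod.fst
  · have hc : _ = true := hkeys.trans (by simp [hmem])
    apply PySem.Dict.ext
    rw [PySem.Dict.items_insert_of_contains _ _ hc, if_pos hmem]
    simp only [List.map_cons, List.map_map]
    rw [if_neg (by simpa using fun h => hlab h.symm)]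
    congr 1
    apply List.map_congr_left
    intro l _
    by_cases h : l = lab
    · subst h; simp [hv]
    · have hbe : (l == lab) = false := by simpa using h
      simp [Function.comp, hbe, pvAggA_snoc_ne L lab p l (fun he => h he.symm)]
  · have hc : _ = false := hkeys.trans (by simp [hmem])
    apply PySem.Dict.ext
    rw [PySem.Dict.items_insert_of_not_contains _ _ hc, if_neg hmem]
    show (("summary", Sum.inl p0) ::
        (PySem.List.dedup (L.map Prod.fst)).map (fun l => (l, pvAggA L l))) ++ [(lab, v)] = _
    rw [List.cons_append]
    congr 1
    rw [List.map_append, List.map_cons, List.map_nil]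
    congr 1
    · apply List.map_congr_left
      intro l hl
      have hne : lab ≠ l := fun he => hmem (he ▸ (PySem.List.mem_dedup _ _).1 hl)
      rw [pvAggA_snoc_ne L lab p l hne]
    · rw [hv]

-- A's whole loop produces exactly the grouped table B builds
theorem pvFoldA (p0 : String) (rest : List String) :
    rest.foldl pvStepA ((PySem.Dict.mk []).insert "summary" (Sum.inl p0)) =
      PySem.Dict.mk (("summary", Sum.inl p0) ::
        (PySem.List.dedup ((pvLabeled rest).map Prod.fst)).map
          (fun l => (l, pvAggA (pvLabeled rest) l))) := by
  induction rest using List.reverseRecOn with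
  | nil => apply PySem.Dict.ext; simp [pvLabeled, PySem.List.dedup, PySem.Dict.items_insert]
  | append_singleton rest p ih =>
    rw [List.foldl_append, List.foldl_cons, List.foldl_nil, ih]
    have hlab := pvClassify_ne_summary p
    have hL : pvLabeled (rest ++ [p]) = pvLabeled rest ++ [(pvClassify p, p)] := by
      simp [pvLabeled]
    rw [hL, pvStepA_classify]
    by_cases hm : pvClassify p = "misc"
    · rw [if_pos hm]
      have hget : (PySem.Dict.mk (("summary", Sum.inl p0) ::
          (PySem.List.dedup ((pvLabeled rest).map Prod.fst)).map
            (fun l => (l, pvAggA (pvLabeled rest) l)))).get? "misc" =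
          if "misc" ∈ PySem.List.dedup ((pvLabeled rest).map Prod.fst)
            then some (pvAggA (pvLabeled rest) "misc") else none := by
        rw [PySem.Dict.get?_mk_cons]
        simp [pvGet?_mk_map]
      by_cases hmem : "misc" ∈ (pvLabeled rest).map Prod.fst
      · rw [hget, if_pos (by simp [hmem])]
        have hagg : pvAggA (pvLabeled rest) "misc" = Sum.inr (pvVals (pvLabeled rest) "misc") := by
          simp [pvAggA]
        rw [hagg, hm] at *
        exact pvInsert_step p0 p "misc" (pvLabeled rest) (by decide) _
          (by simp [pvAggA, pvVals_snoc])
      · rw [hget, if_neg (by simp [hmem])]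
        rw [hm] at *
        exact pvInsert_step p0 p "misc" (pvLabeled rest) (by decide) _
          (by simp [pvAggA, pvVals_snoc, pvVals_nil_of_not_mem _ _ hmem])
    · rw [if_neg hm]
      exact pvInsert_step p0 p (pvClassify p) (pvLabeled rest) hlab _
        (by simp [pvAggA, hm, pvVals_snoc])

theorem pvFilter_eq (l : List String) :
    l.filter (fun p => decide (p ≠ "") && decide (PySem.Str.strip p ≠ "")) =
      l.filter (fun p => decide (PySem.Str.strip p ≠ "")) := by
  apply List.filter_congr
  intro p _
  by_cases h : p = ""
  · subst h; decide
  · simp [h]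

-- ===== VERDICT (by name: the statement is the Claim_ definition above) =====
theorem parse_device_description_spec : Claim_equal_parse_device_description := by
  intro desc _
  unfold Spec_parse_device_description parse_device_description parse_device_description_alt
  rw [pvFilter_eq]
  set parts := (((PySem.Str.split? desc ",").getD []).filter
      (fun p => decide (PySem.Str.strip p ≠ ""))).map PySem.Str.strip with hparts
  cases parts with
  | nil => rfl
  | cons p0 rest =>
    simp only [List.drop_succ_cons, List.drop_zero]
    rw [pvFoldA p0 rest]
    -- B's fold inserts fresh distinct keys, so its items are init ++ table
    have hfresh : ∀ a ∈ PySem.List.dedup ((pvLabeled rest).map Prod.fst),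
        ((PySem.Dict.mk ([] : List (String × String))).insert "summary" p0).contains a = false := by
      intro a ha
      have := (PySem.List.mem_dedup _ _).1 ha
      obtain ⟨q, hq, rfl⟩ := List.mem_map.1 this
      obtain ⟨r, _, rfl⟩ := List.mem_map.1 hq
      rw [PySem.Dict.contains_eq_decide_mem_keys]
      simp [PySem.Dict.keys, PySem.Dict.items_insert, pvClassify_ne_summary r]
    have hnodup : ((PySem.List.dedup ((pvLabeled rest).map Prod.fst)).map id).Nodup := by
      simpa using PySem.List.nodup_dedup ((pvLabeled rest).map Prod.fst)
    have hB := PySem.Dict.items_foldl_insert_fresh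
      (l := PySem.List.dedup (((rest.map (fun p => (pvClassify p, p))).map Prod.fst)))
      (k := id)
      (v := fun lab => if lab == "misc"
        then PySem.Str.join ", " (((rest.map (fun p => (pvClassify p, p))).filter (fun q => q.1 == lab)).map Prod.snd)
        else (((rest.map (fun p => (pvClassify p, p))).filter (fun q => q.1 == lab)).map Prod.snd).getLastD "")
      (d := (PySem.Dict.mk []).insert "summary" p0) (by simpa [pvLabeled] using hfresh)
      (by simpa [pvLabeled] using hnodup)
    simp only [id] at hB
    show (PySem.Dict.mk (("summary", Sum.inl p0) ::
        (PySem.List.dedup ((pvLabeled rest).map Prod.fst)).map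
          (fun l => (l, pvAggA (pvLabeled rest) l)))).items.map
        (fun q => (q.1, pvConv q.2)) = _
    rw [hB]
    have hinit : ((PySem.Dict.mk ([] : List (String × String))).insert "summary" p0).items
        = [("summary", p0)] := by
      apply congrArg PySem.Dict.items (a₂ := PySem.Dict.mk [("summary", p0)]) rfl
    rw [hinit]
    simp only [List.map_cons, List.map_map]
    rw [List.singleton_append]
    congr 1
    simp only [pvLabeled, List.map_map]
    apply List.map_congr_left
    intro l _
    by_cases h : l = "misc" <;>
      simp [pvAggA, pvConv, pvVals, Function.comp, h]
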